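-- pv_equiv track=rewrite | github.com/eucle/leetcode | 1769.py | minOperations
-- ===== SOURCE A (Python) =====
-- def minOperations(boxes: str) -> list[int]:
--     ans = []
--     for i in range(len(boxes)):
--         summ = 0
--         for j in range(len(boxes)):
--             if boxes[j] == '1':
--                 summ += abs(j - i)
--         ans.append(summ)
--     return ans
-- ===== SOURCE B (Python) =====
-- def minOperations(boxes: str) -> list[int]:
--     # Two linear prefix-sum passes (count of '1's seen and accumulated cost
--     # from each side) instead of A's quadratic double loop.
--     left = []
--     cnt = 0
--     cost = 0
--     for c in boxes:
--         left.append(cost)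
--         cnt += (c == '1')
--         cost += cnt
--     right = []
--     cnt = 0
--     cost = 0
--     for c in reversed(boxes):
--         right.append(cost)
--         cnt += (c == '1')
--         cost += cnt
--     right.reverse()
--     return [l + r for l, r in zip(left, right)]
-- ===== Notes on version B (the rewrite author's own statement) =====
-- stated objective: faster
-- what changed: Replaced the quadratic per-index rescan of all occupied boxes by two linear passes that carry a running count of occupied boxes and an accumulated distance cost from the left and from the right, summed per index.
import Mathlib
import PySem

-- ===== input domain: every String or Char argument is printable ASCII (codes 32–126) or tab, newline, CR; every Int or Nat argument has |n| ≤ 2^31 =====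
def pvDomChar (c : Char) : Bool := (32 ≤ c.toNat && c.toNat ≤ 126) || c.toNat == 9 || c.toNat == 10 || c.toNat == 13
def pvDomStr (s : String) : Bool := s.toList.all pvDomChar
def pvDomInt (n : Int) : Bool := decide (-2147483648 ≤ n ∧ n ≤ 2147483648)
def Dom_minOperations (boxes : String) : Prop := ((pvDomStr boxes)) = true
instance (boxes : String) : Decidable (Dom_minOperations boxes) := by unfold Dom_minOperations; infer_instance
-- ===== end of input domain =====

-- B replaces A's quadratic double loop by two linear prefix-sum passes (count + accumulated cost from each side); proved to return the same list on every input.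


-- ===== PORT A =====
-- literal transliteration of A: for each i in range(n), an inner loop over j
-- summing abs(j - i) for the '1' boxes.  boxes[j] is ported as toList.getD
-- (the index j is always in range, so Python never raises here).
def minOperations (boxes : String) : List Int :=
  let cs := boxes.toList
  let n := cs.length
  (List.range n).foldl
    (fun (ans : List Int) (i : Nat) =>
      ans ++ [(List.range n).foldl
        (fun (summ : Int) (j : Nat) =>
          if cs.getD j ' ' = '1' then summ + |(j : Int) - (i : Int)| else summ)
        0])
    []

-- ===== PORT B =====
-- one forward pass of Source B: append current cost, then cnt += (c=='1'), cost += cnt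
def pvPass (cs : List Char) : List Int :=
  (cs.foldl
    (fun (s : List Int × Int × Int) c =>
      let b : Int := if c = '1' then 1 else 0
      (s.1 ++ [s.2.2], s.2.1 + b, s.2.2 + (s.2.1 + b)))
    ([], 0, 0)).1

def minOperations_alt (boxes : String) : List Int :=
  let cs := boxes.toList
  let left := pvPass cs
  let right := (pvPass cs.reverse).reverse
  List.zipWith (· + ·) left right

-- ===== PRECONDITION & SPEC =====
def Spec_minOperations (boxes : String) (out : List Int) : Prop := out = minOperations_alt boxes
instance (boxes : String) (out : List Int) : Decidable (Spec_minOperations boxes out) := by unfold Spec_minOperations; infer_instance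

-- ===== CLAIM (what is proved, stated in full; the proofs are below) =====
def Claim_equal_minOperations : Prop := ∀ (boxes : String), Dom_minOperations boxes → Spec_minOperations boxes (minOperations boxes)

-- ===== LEMMAS AND PROOFS =====

-- Σ_j [cs_j = '1'] * |j - x|
def pvA : List Char → Int → Int
  | [], _ => 0
  | c :: cs, x => (if c = '1' then |x| else 0) + pvA cs (x - 1)

-- Σ_j [cs_j = '1'] * max (x - j) 0   (left-side cost)
def pvL : List Char → Int → Int
  | [], _ => 0
  | c :: cs, x => (if c = '1' then max x 0 else 0) + pvL cs (x - 1)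

-- Σ_j [cs_j = '1'] * max (j - x) 0   (right-side cost)
def pvR : List Char → Int → Int
  | [], _ => 0
  | c :: cs, x => (if c = '1' then max (-x) 0 else 0) + pvR cs (x - 1)

theorem pvA_eq (cs : List Char) : ∀ x : Int, pvA cs x = pvL cs x + pvR cs x := by
  induction cs with
  | nil => intro x; simp [pvA, pvL, pvR]
  | cons c cs ih =>
    intro x
    simp only [pvA, pvL, pvR, ih]
    have : |x| = max x 0 + max (-x) 0 := by
      rcases abs_cases x with ⟨h1, h2⟩ | ⟨h1, h2⟩ <;> omega
    split_ifs <;> omega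

theorem pvL_nonpos (cs : List Char) : ∀ x : Int, x ≤ 0 → pvL cs x = 0 := by
  induction cs with
  | nil => intro x _; simp [pvL]
  | cons c cs ih =>
    intro x hx
    simp only [pvL, ih (x - 1) (by omega)]
    split_ifs <;> omega

theorem pvL_append (as bs : List Char) :
    ∀ x : Int, pvL (as ++ bs) x = pvL as x + pvL bs (x - as.length) := by
  induction as with
  | nil => intro x; simp [pvL]
  | cons c as ih =>
    intro x
    simp only [List.cons_append, pvL, ih, List.length_cons]
    push_cast
    have h : x - 1 - (as.length : Int) = x - ((as.length : Int) + 1) := by ring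
    rw [h]
    ring

theorem pvL_reverse (cs : List Char) :
    ∀ x : Int, pvL cs.reverse x = pvR cs ((cs.length : Int) - 1 - x) := by
  induction cs with
  | nil => intro x; simp [pvL, pvR]
  | cons c cs ih =>
    intro x
    rw [List.reverse_cons, pvL_append, ih]
    simp only [pvL, pvR, List.length_reverse, List.length_cons]
    have e1 : (((cs.length + 1 : Nat) : Int)) - 1 - x - 1 = ((cs.length : Int)) - 1 - x := by
      push_cast; ring
    have e2 : -((((cs.length + 1 : Nat) : Int)) - 1 - x) = x - ((cs.length : Int)) := by
      push_cast; ring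
    rw [e1, e2]
    split_ifs <;> omega

-- A's inner loop computes pvA
theorem innerA (cs : List Char) : ∀ (x a : Int),
    (List.range cs.length).foldl
      (fun (summ : Int) (j : Nat) => if cs.getD j ' ' = '1' then summ + |(j : Int) - x| else summ) a
    = a + pvA cs x := by
  induction cs with
  | nil => intro x a; simp [pvA]
  | cons c cs ih =>
    intro x a
    simp only [List.length_cons]
    rw [List.range_succ_eq_map]
    simp only [List.foldl_cons, List.foldl_map, List.getD_cons_zero, List.getD_cons_succ,
      Nat.cast_zero, Nat.cast_succ]
    rw [show (fun (summ : Int) (j : Nat) =>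
        if cs.getD j ' ' = '1' then summ + |((j : Int) + 1) - x| else summ)
      = (fun (summ : Int) (j : Nat) =>
        if cs.getD j ' ' = '1' then summ + |(j : Int) - (x - 1)| else summ) from by
        funext summ j
        have h : ((j : Int) + 1) - x = (j : Int) - (x - 1) := by ring
        rw [h]]
    rw [ih (x - 1)]
    simp only [pvA, zero_sub, abs_neg]
    split_ifs <;> omega

-- A's outer loop is a map over range
theorem foldl_append_map {α β : Type} (f : α → β) :
    ∀ (l : List α) (a : List β),
      l.foldl (fun ans i => ans ++ [f i]) a = a ++ l.map f := by
  intro l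
  induction l with
  | nil => intro a; simp
  | cons x l ih => intro a; simp [ih]

theorem minOperations_eq (boxes : String) :
    minOperations boxes
      = (List.range boxes.toList.length).map (fun i : Nat => pvA boxes.toList (i : Int)) := by
  unfold minOperations
  rw [foldl_append_map]
  simp only [List.nil_append]
  apply List.map_congr_left
  intro i _
  rw [innerA]
  ring

-- the pass invariant: state (cnt, cost) entering position i contributes cost + cnt*i
def pvPassF : List Char → Int → Int → List Int
  | [], _, _ => []
  | c :: cs, cnt, cost =>
      let b : Int := if c = '1' then 1 else 0
      cost :: pvPassF cs (cnt + b) (cost + (cnt + b))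

theorem pvPass_foldl (cs : List Char) : ∀ (a : List Int) (cnt cost : Int),
    (cs.foldl
      (fun (s : List Int × Int × Int) c =>
        let b : Int := if c = '1' then 1 else 0
        (s.1 ++ [s.2.2], s.2.1 + b, s.2.2 + (s.2.1 + b)))
      (a, cnt, cost)).1 = a ++ pvPassF cs cnt cost := by
  induction cs with
  | nil => intro a cnt cost; simp [pvPassF]
  | cons c cs ih => intro a cnt cost; simp [pvPassF, ih]

theorem pvPassF_eq (cs : List Char) : ∀ (cnt cost : Int),
    pvPassF cs cnt cost
      = (List.range cs.length).map (fun i : Nat => cost + cnt * (i : Int) + pvL cs (i : Int)) := by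
  induction cs with
  | nil => intro cnt cost; simp [pvPassF]
  | cons c cs ih =>
    intro cnt cost
    simp only [pvPassF, List.length_cons, List.range_succ_eq_map, List.map_cons, List.map_map]
    congr 1
    · simp only [pvL, Nat.cast_zero]
      rw [pvL_nonpos cs (0 - 1) (by omega)]
      split_ifs <;> omega
    · rw [ih]
      apply List.map_congr_left
      intro i _
      simp only [Function.comp, pvL, Nat.cast_succ]
      have h1 : ((i : Int) + 1 - 1) = (i : Int) := by ring
      have h2 : max ((i : Int) + 1) 0 = (i : Int) + 1 := by omega
      rw [h1, h2]
      split_ifs <;> ring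

theorem pvPass_eq (cs : List Char) :
    pvPass cs = (List.range cs.length).map (fun i : Nat => pvL cs (i : Int)) := by
  unfold pvPass
  rw [pvPass_foldl]
  rw [pvPassF_eq]
  simp

-- ===== VERDICT (by name: the statement is the Claim_ definition above) =====
theorem minOperations_spec : Claim_equal_minOperations := by
  intro boxes _
  unfold Spec_minOperations
  rw [minOperations_eq,
    show minOperations_alt boxes
      = List.zipWith (· + ·) (pvPass boxes.toList) ((pvPass boxes.toList.reverse).reverse)
      from rfl,
    pvPass_eq, pvPass_eq]
  apply List.ext_getElem
  · simp
  · intro i h1 h2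
    simp only [List.getElem_map, List.getElem_range, List.getElem_zipWith,
      List.getElem_reverse, List.length_map, List.length_range, List.length_reverse,
      ] at *
    rw [pvA_eq]
    congr 1
    rw [pvL_reverse]
    congr 1
    simp only [List.length_map, List.length_range] at h1
    omega
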